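-- pv_equiv track=rewrite | github.com/Amallmmd/ChatBot | WebApp/logic.py | get_next_valid_report_types
-- ===== SOURCE A (Python) =====
-- REPORT_SEQUENCE = [
--     "At Sea",
--     "Arrival",
--     "Arrival At Berth",
--     "In Port",  # Can repeat any number of times between Arrival At Berth and Departure From Berth
--     "Departure From Berth",
--     "Departure"
-- ]
--
-- def get_next_valid_report_types(history):
--     # Remove consecutive duplicates
--     filtered = [history[0]] if history else []
--     for r in history[1:]:
--         if r != filtered[-1]:
--             filtered.append(r)
--     # Find last non-In Port report
--     last = None
--     for r in reversed(filtered):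
--         if r != "In Port":
--             last = r
--             break
--     if last is None:
--         return [REPORT_SEQUENCE[0]]
--     idx = REPORT_SEQUENCE.index(last)
--     if last == "Arrival At Berth":
--         return ["Arrival At Berth", "In Port", "Departure From Berth"]
--     if last == "Departure From Berth":
--         return ["Departure From Berth", "In Port", "Departure"]
--     if last == "In Port":
--         return ["In Port", "Arrival At Berth", "Departure From Berth", "Departure"]
--     if last == "Arrival":
--         return ["Arrival","In Port", "Arrival At Berth"]
--     if last == "At Sea":
--         return ["At Sea","Arrival"]
--     if last == "Departure":
--         return ["Departure","At Sea"]
--     return [REPORT_SEQUENCE[idx+1]] if idx+1 < len(REPORT_SEQUENCE) else []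
-- ===== SOURCE B (Python) =====
-- NEXT = {
--     "At Sea": ["At Sea", "Arrival"],
--     "Arrival": ["Arrival", "In Port", "Arrival At Berth"],
--     "Arrival At Berth": ["Arrival At Berth", "In Port", "Departure From Berth"],
--     "Departure From Berth": ["Departure From Berth", "In Port", "Departure"],
--     "Departure": ["Departure", "At Sea"],
-- }
--
-- def get_next_valid_report_types(history):
--     # Forward state machine: start at the initial state and let each recognized
--     # report transition the set of valid next reports; "In Port" (absent from
--     # the table) never changes the state.
--     options = ["At Sea"]
--     for r in history:
--         options = NEXT.get(r, options)
--     return list(options)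
-- ===== Notes on version B (the rewrite author's own statement) =====
-- stated objective: alternative
-- what changed: B is a forward single-pass state machine: it folds over the history from the start, each recognized report overwriting the current options list via a transition table ('In Port' is absent so it keeps the state), whereas A dedups, then scans backwards for the last non-'In Port' report and dispatches through an if/elif chain.
import Mathlib
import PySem

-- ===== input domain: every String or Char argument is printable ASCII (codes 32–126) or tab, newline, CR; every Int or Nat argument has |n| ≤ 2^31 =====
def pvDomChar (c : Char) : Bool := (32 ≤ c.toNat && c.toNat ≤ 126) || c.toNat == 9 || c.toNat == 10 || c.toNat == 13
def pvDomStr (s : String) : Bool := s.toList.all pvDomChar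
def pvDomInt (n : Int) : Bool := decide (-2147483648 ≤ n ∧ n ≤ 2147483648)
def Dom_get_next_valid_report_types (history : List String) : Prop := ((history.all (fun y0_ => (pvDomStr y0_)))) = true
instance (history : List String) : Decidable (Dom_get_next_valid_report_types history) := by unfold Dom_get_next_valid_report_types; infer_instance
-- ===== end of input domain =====

-- B replaces A's dedup pass + reverse search + if/elif chain with a forward single-pass
-- state machine driven by a transition table (objective: alternative).

-- ===== PORT A =====
def REPORT_SEQUENCE : List String :=
  ["At Sea", "Arrival", "Arrival At Berth", "In Port", "Departure From Berth", "Departure"]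

def get_next_valid_report_types (history : List String) : List String :=
  -- Remove consecutive duplicates
  let filtered : List String :=
    match history with
    | [] => []
    | h :: t => t.foldl (fun acc r => if r ≠ acc.getLast! then acc ++ [r] else acc) [h]
  -- Find last non-In Port report (loop over reversed(filtered) with break)
  let last : Option String := filtered.reverse.find? (fun r => r != "In Port")
  match last with
  | none => [REPORT_SEQUENCE.getD 0 ""]
  | some last =>
    match PySem.List.index? REPORT_SEQUENCE last with
    | none => []  -- ValueError: excluded by Pre_
    | some idx =>
      if last = "Arrival At Berth" then ["Arrival At Berth", "In Port", "Departure From Berth"]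
      else if last = "Departure From Berth" then ["Departure From Berth", "In Port", "Departure"]
      else if last = "In Port" then ["In Port", "Arrival At Berth", "Departure From Berth", "Departure"]
      else if last = "Arrival" then ["Arrival", "In Port", "Arrival At Berth"]
      else if last = "At Sea" then ["At Sea", "Arrival"]
      else if last = "Departure" then ["Departure", "At Sea"]
      else if idx + 1 < REPORT_SEQUENCE.length then [REPORT_SEQUENCE.getD (idx + 1) ""] else []

-- ===== PORT B =====
def pvNext : PySem.Dict String (List String) :=
  PySem.Dict.ofList
    [ ("At Sea", ["At Sea", "Arrival"]),
      ("Arrival", ["Arrival", "In Port", "Arrival At Berth"]),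
      ("Arrival At Berth", ["Arrival At Berth", "In Port", "Departure From Berth"]),
      ("Departure From Berth", ["Departure From Berth", "In Port", "Departure"]),
      ("Departure", ["Departure", "At Sea"]) ]

def get_next_valid_report_types_alt (history : List String) : List String :=
  -- forward state machine: NEXT.get(r, options); 'list(options)' copy is the identity on the value
  history.foldl (fun options r => (pvNext.get? r).getD options) ["At Sea"]

-- ===== PRECONDITION & SPEC =====
-- Pre_ excludes histories whose last report other than "In Port" is not a known report type:
-- there A raises ValueError (list.index), so A returns no value.
def Pre_get_next_valid_report_types (history : List String) : Prop :=
  ((history.filter (fun r => r != "In Port")).getLast?).all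
    (fun r => decide (r ∈ REPORT_SEQUENCE)) = true
instance (history : List String) : Decidable (Pre_get_next_valid_report_types history) := by unfold Pre_get_next_valid_report_types; infer_instance

def pvWitness_get_next_valid_report_types : List String := ["At Sea", "Arrival", "In Port"]

def Spec_get_next_valid_report_types (history : List String) (out : List String) : Prop := out = get_next_valid_report_types_alt history
instance (history : List String) (out : List String) : Decidable (Spec_get_next_valid_report_types history out) := by unfold Spec_get_next_valid_report_types; infer_instance

-- ===== CLAIM (what is proved, stated in full; the proofs are below) =====
def Claim_equal_get_next_valid_report_types : Prop := ∀ (history : List String), Dom_get_next_valid_report_types history → Pre_get_next_valid_report_types history → Spec_get_next_valid_report_types history (get_next_valid_report_types history)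

-- ===== LEMMAS AND PROOFS =====

-- A's consecutive-dedup fold does not change which element a reversed search finds.
set_option maxRecDepth 2048 in
theorem find?_reverse_foldl_dedup (p : String → Bool) :
    ∀ (t acc : List String), acc ≠ [] →
    ((t.foldl (fun acc r => if r ≠ acc.getLast! then acc ++ [r] else acc) acc).reverse.find? p)
      = (t.reverse.find? p).or (acc.reverse.find? p) := by
  intro t
  induction t with
  | nil => intro acc h; simp
  | cons r t ih =>
    intro acc hacc
    have hstep : (if r ≠ acc.getLast! then acc ++ [r] else acc) ≠ [] := by
      split <;> simp_all
    have := ih _ hstep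
    rw [List.foldl_cons, this]
    have hkey : ((if r ≠ acc.getLast! then acc ++ [r] else acc).reverse.find? p)
        = (List.find? p [r]).or (acc.reverse.find? p) := by
      by_cases h : r = acc.getLast!
      · simp only [h, ne_eq, not_true_eq_false, if_false]
        obtain ⟨a, rest, hrev⟩ : ∃ a rest, acc.reverse = a :: rest := by
          cases hr : acc.reverse with
          | nil => exact absurd (by simpa using hr) hacc
          | cons a rest => exact ⟨a, rest, rfl⟩
        have h1 : acc.getLast? = some a := by
          rw [← List.head?_reverse, hrev]; rfl
        rw [hrev, List.find?_cons, List.find?_cons]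
        rcases hp : p a with _ | _ <;> simp [List.getLast!_eq_getLast?_getD, h1, hp]
      · simp only [ne_eq, h, not_false_eq_true, if_true, List.reverse_append,
          List.reverse_singleton, List.singleton_append, List.find?_cons]
        rcases hp : p r with _ | _ <;> simp
    rw [hkey]
    rw [List.reverse_cons, List.find?_append, Option.or_assoc]

-- The search A performs over the reversed history is Pre_'s filter-getLast?.
set_option maxRecDepth 2048 in
theorem find?_reverse_eq_filter_getLast? (p : String → Bool) (xs : List String) :
    xs.reverse.find? p = (xs.filter p).getLast? := by
  rw [List.getLast?_eq_head?_reverse, ← List.filter_reverse]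
  induction xs.reverse with
  | nil => rfl
  | cons a l ih =>
    rw [List.find?_cons, List.filter_cons]
    rcases hp : p a with _ | _
    · simpa using ih
    · simp

-- B's forward fold computes the table entry of the last recognized report (or the start state).
theorem foldl_next_eq_find? :
    ∀ (l : List String) (acc : List String),
    l.foldl (fun options r => (pvNext.get? r).getD options) acc
      = match l.reverse.find? (fun r => (pvNext.get? r).isSome) with
        | none => acc
        | some r => (pvNext.get? r).getD [] := by
  intro l
  induction l with
  | nil => intro acc; rfl
  | cons x t ih =>
    intro acc
    rw [List.foldl_cons, ih]
    rw [List.reverse_cons, List.find?_append]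
    cases hf : t.reverse.find? (fun r => (pvNext.get? r).isSome) with
    | some r => simp
    | none =>
      cases hx : pvNext.get? x with
      | none => simp [List.find?, hx]
      | some v => simp [List.find?, hx]

-- A find? under a weaker predicate transfers to a stronger one at the found element.
theorem find?_strengthen (p q : String → Bool) :
    ∀ (l : List String) (r : String), l.find? p = some r →
    (∀ x, q x = true → p x = true) → q r = true → l.find? q = some r := by
  intro l
  induction l with
  | nil => intro r h; simp at h
  | cons a t ih =>
    intro r h himp hqr
    rw [List.find?_cons] at h ⊢
    rcases hp : p a with _ | _
    · rw [hp] at h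
      have hqa : q a = false := by
        rcases hq : q a with _ | _
        · rfl
        · exact absurd (himp a hq) (by simp [hp])
      rw [hqa]
      exact ih r h himp hqr
    · rw [hp] at h
      simp only [Option.some.injEq] at h
      subst h
      rw [hqr]

theorem find?_none_of_imp (p q : String → Bool) (l : List String)
    (h : l.find? p = none) (himp : ∀ x, q x = true → p x = true) :
    l.find? q = none := by
  rw [List.find?_eq_none] at h ⊢
  intro x hx hq
  exact h x hx (himp x hq)

theorem pvNext_key_ne_inport (x : String) (h : (pvNext.get? x).isSome = true) :
    (x != "In Port") = true := by
  by_contra hc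
  have hx : x = "In Port" := by simpa using hc
  subst hx
  exact absurd h (by decide)

-- ===== VERDICT (by name: the statement is the Claim_ definition above) =====
set_option maxRecDepth 4096 in
theorem get_next_valid_report_types_spec : Claim_equal_get_next_valid_report_types := by
  intro history _ hpre
  unfold Spec_get_next_valid_report_types get_next_valid_report_types get_next_valid_report_types_alt
  rw [foldl_next_eq_find?]
  cases history with
  | nil => decide
  | cons h t =>
    simp only
    rw [find?_reverse_foldl_dedup _ t [h] (by simp)]
    have hsearch : (t.reverse.find? (fun r => r != "In Port")).or
        (List.find? (fun r => r != "In Port") (List.reverse [h]))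
        = (h :: t).reverse.find? (fun r => r != "In Port") := by
      rw [show (h :: t).reverse = t.reverse ++ [h] from List.reverse_cons .., List.find?_append]
      simp
    rw [hsearch]
    unfold Pre_get_next_valid_report_types at hpre
    rw [← find?_reverse_eq_filter_getLast? (fun r => r != "In Port") (h :: t)] at hpre
    cases hl : (h :: t).reverse.find? (fun r => r != "In Port") with
    | none =>
      rw [find?_none_of_imp _ _ _ hl pvNext_key_ne_inport]
      decide
    | some r =>
      rw [hl] at hpre
      have hmem : r ∈ REPORT_SEQUENCE := by simpa using hpre
      have hp : (r != "In Port") = true := List.find?_some (p := fun r => r != "In Port") hl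
      simp only [REPORT_SEQUENCE, List.mem_cons, List.not_mem_nil, or_false] at hmem
      rcases hmem with h1 | h1 | h1 | h1 | h1 | h1 <;> subst h1 <;>
        first
        | exact absurd hp (by decide)
        | (rw [find?_strengthen _ _ _ _ hl pvNext_key_ne_inport (by decide)]; decide)
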